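-- pv_equiv track=rewrite | github.com/Guiliang/sport-analytic-variational-embedding | testing/validate_next_goal/run_next_goal_temporal_plot.py | compute_next_goal_calibration_values
-- ===== SOURCE A (Python) =====
-- def compute_next_goal_calibration_values(actions_all, home_away):
--     """ground truth value for each game"""
--     pre_index = 0
--     cali_home = [0] * len(actions_all)
--     cali_away = [0] * len(actions_all)
--     cali_end = [0] * len(actions_all)
--     for index in range(0, len(actions_all)):
--         action = actions_all[index]
--         if action['name'] == 'goal':
--             if home_away[index] == 1:
--                 cali_home[pre_index:index] = [1] * (index - pre_index)
--             elif home_away[index] == 0: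
--                 cali_away[pre_index:index] = [1] * (index - pre_index)
--             pre_index = index
--         if index == len(actions_all) - 1:
--             cali_end[pre_index:index] = [1] * (index - pre_index)
--     return zip(cali_home, cali_away, cali_end)
-- ===== SOURCE B (Python) =====
-- def compute_next_goal_calibration_values(actions_all, home_away):
--     """ground truth value for each game"""
--     n = len(actions_all)
--     cali_home = [0] * n
--     cali_away = [0] * n
--     cali_end = [0] * n
--     next_goal_team = None
--     for i in range(n - 1, -1, -1):
--         if next_goal_team is not None:
--             if next_goal_team == 1:
--                 cali_home[i] = 1
--             elif next_goal_team == 0: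
--                 cali_away[i] = 1
--         elif i < n - 1:
--             cali_end[i] = 1
--         if actions_all[i]['name'] == 'goal':
--             next_goal_team = home_away[i]
--     return zip(cali_home, cali_away, cali_end)
-- ===== Notes on version B (the rewrite author's own statement) =====
-- stated objective: simpler
-- what changed: B replaces A's forward loop with repeated slice-fill assignments by a single backward pass that carries the next goal's team in one sentinel variable and writes each index's triple once.
import Mathlib
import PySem

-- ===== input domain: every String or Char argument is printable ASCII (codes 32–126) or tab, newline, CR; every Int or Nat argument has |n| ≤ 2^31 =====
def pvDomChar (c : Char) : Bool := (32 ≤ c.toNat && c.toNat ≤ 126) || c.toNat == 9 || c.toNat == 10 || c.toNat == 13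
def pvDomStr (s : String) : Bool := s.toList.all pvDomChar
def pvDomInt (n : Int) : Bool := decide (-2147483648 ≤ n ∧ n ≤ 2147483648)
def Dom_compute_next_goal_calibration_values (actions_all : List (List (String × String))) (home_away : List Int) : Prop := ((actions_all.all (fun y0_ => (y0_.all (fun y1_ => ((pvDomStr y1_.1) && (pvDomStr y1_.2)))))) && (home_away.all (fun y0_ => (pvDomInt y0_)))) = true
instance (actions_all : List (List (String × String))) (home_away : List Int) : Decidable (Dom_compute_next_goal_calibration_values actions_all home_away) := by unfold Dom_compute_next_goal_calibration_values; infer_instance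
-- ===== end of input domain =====

-- B replaces A's forward loop with slice-fills by a single backward pass carrying the next goal's
-- team (objective: simpler decomposition; same return value on every input A accepts).

-- ===== PORT A =====
-- action['name']: first-match lookup in the association list (Pre_ guarantees the key is present)
def pvNameOf (d : List (String × String)) : Option String :=
  (d.find? (fun p => p.1 == "name")).map (fun p => p.2)

-- exact port of the slice assignment l[a:b] = [1]*(b-a) for 0 ≤ a ≤ b ≤ len l (always the case here)
def pvSliceFill (l : List Int) (a b : Nat) : List Int :=
  l.mapIdx (fun i x => if a ≤ i ∧ i < b then 1 else x)

-- one iteration of A's loop body; state = (pre_index, cali_home, cali_away, cali_end)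
def pvStepA (actions_all : List (List (String × String))) (home_away : List Int) (n : Nat)
    (st : Nat × List Int × List Int × List Int) (index : Nat) :
    Nat × List Int × List Int × List Int :=
  let action := actions_all.getD index []
  let st1 :=
    if pvNameOf action == some "goal" then
      if home_away.getD index 0 == (1 : Int) then
        (index, pvSliceFill st.2.1 st.1 index, st.2.2.1, st.2.2.2)
      else if home_away.getD index 0 == (0 : Int) then
        (index, st.2.1, pvSliceFill st.2.2.1 st.1 index, st.2.2.2)
      else
        (index, st.2.1, st.2.2.1, st.2.2.2)
    else st
  if index == n - 1 then
    (st1.1, st1.2.1, st1.2.2.1, pvSliceFill st1.2.2.2 st1.1 index)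
  else st1

def compute_next_goal_calibration_values (actions_all : List (List (String × String))) (home_away : List Int) : List (Int × Int × Int) :=
  let n := actions_all.length
  let st := (List.range n).foldl (pvStepA actions_all home_away n)
    (0, List.replicate n (0 : Int), List.replicate n (0 : Int), List.replicate n (0 : Int))
  st.2.1.zip (st.2.2.1.zip st.2.2.2)   -- zip(cali_home, cali_away, cali_end)

-- ===== PORT B =====
-- the triple B writes at index i, given the pending next-goal team (none = no goal after i)
def pvTrip (next : Option Int) (i n : Nat) : Int × Int × Int :=
  match next with
  | some v => if v == (1 : Int) then (1, 0, 0) else if v == (0 : Int) then (0, 1, 0) else (0, 0, 0)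
  | none => if i < n - 1 then (0, 0, 1) else (0, 0, 0)

-- B's backward loop: i runs n-1, …, 0; the triple is assigned, then the state is updated
def pvAltGo (actions_all : List (List (String × String))) (home_away : List Int) (n : Nat) :
    Nat → Option Int → List (Int × Int × Int) → List (Int × Int × Int)
  | 0, _, acc => acc
  | i + 1, next, acc =>
    let t := pvTrip next i n
    let next' := if pvNameOf (actions_all.getD i []) == some "goal"
                 then some (home_away.getD i 0) else next
    pvAltGo actions_all home_away n i next' (t :: acc)

def compute_next_goal_calibration_values_alt (actions_all : List (List (String × String))) (home_away : List Int) : List (Int × Int × Int) :=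
  pvAltGo actions_all home_away actions_all.length actions_all.length none []

-- ===== PRECONDITION & SPEC =====
-- Pre_ excludes exactly the inputs where the Python A raises (and B raises there too): an action
-- without a 'name' key (KeyError) or a 'goal' action at an index past the end of home_away (IndexError).
def Pre_compute_next_goal_calibration_values (actions_all : List (List (String × String))) (home_away : List Int) : Prop :=
  ∀ i, i < actions_all.length →
    (pvNameOf (actions_all.getD i [])).isSome = true ∧
    (pvNameOf (actions_all.getD i []) = some "goal" → i < home_away.length)
instance (actions_all : List (List (String × String))) (home_away : List Int) : Decidable (Pre_compute_next_goal_calibration_values actions_all home_away) := by unfold Pre_compute_next_goal_calibration_values; infer_instance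

def pvWitness_compute_next_goal_calibration_values : (List (List (String × String))) × List Int :=
  ([[("name", "shot")], [("name", "goal")], [("name", "pass")]], [0, 1, 0])

def Spec_compute_next_goal_calibration_values (actions_all : List (List (String × String))) (home_away : List Int) (out : List (Int × Int × Int)) : Prop := out = compute_next_goal_calibration_values_alt actions_all home_away
instance (actions_all : List (List (String × String))) (home_away : List Int) (out : List (Int × Int × Int)) : Decidable (Spec_compute_next_goal_calibration_values actions_all home_away out) := by unfold Spec_compute_next_goal_calibration_values; infer_instance

-- ===== CLAIM (what is proved, stated in full; the proofs are below) =====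
def Claim_equal_compute_next_goal_calibration_values : Prop := ∀ (actions_all : List (List (String × String))) (home_away : List Int), Dom_compute_next_goal_calibration_values actions_all home_away → Pre_compute_next_goal_calibration_values actions_all home_away → Spec_compute_next_goal_calibration_values actions_all home_away (compute_next_goal_calibration_values actions_all home_away)

-- ===== LEMMAS AND PROOFS =====

-- is index j a goal action?
def pvIsG (acts : List (List (String × String))) (j : Nat) : Bool :=
  pvNameOf (acts.getD j []) == some "goal"

-- least goal index j with a ≤ j < k
def pvNgeq (acts : List (List (String × String))) (a : Nat) : Nat → Option Nat
  | 0 => none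
  | k + 1 =>
    match pvNgeq acts a k with
    | some j => some j
    | none => if a ≤ k ∧ pvIsG acts k then some k else none

-- A's pre_index after processing indices [0, k)
def pvPreIdx (acts : List (List (String × String))) : Nat → Nat
  | 0 => 0
  | k + 1 => if pvIsG acts k then k else pvPreIdx acts k

-- B's state after processing m indices (i.e. indices [n-m, n)): team of the least goal there
def pvT (acts : List (List (String × String))) (ha : List Int) (n : Nat) : Nat → Option Int
  | 0 => none
  | m + 1 => if pvIsG acts (n - m - 1) then some (ha.getD (n - m - 1) 0) else pvT acts ha n m

def pvTeam (ha : List Int) (o : Option Nat) : Option Int := o.map (fun j => ha.getD j 0)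

-- elementwise values of A's home/away arrays, as functions of the next-goal index
def pvCHf (ha : List Int) (o : Option Nat) : Int :=
  match o with
  | some j => if ha.getD j 0 == (1 : Int) then 1 else 0
  | none => 0

def pvCAf (ha : List Int) (o : Option Nat) : Int :=
  match o with
  | some j => if ha.getD j 0 == (1 : Int) then 0 else if ha.getD j 0 == (0 : Int) then 1 else 0
  | none => 0

-- closed forms of A's arrays after processing indices [0, k)
def pvCH (acts : List (List (String × String))) (ha : List Int) (n k : Nat) : List Int :=
  (List.range n).map (fun i => pvCHf ha (pvNgeq acts (i + 1) k))

def pvCA (acts : List (List (String × String))) (ha : List Int) (n k : Nat) : List Int :=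
  (List.range n).map (fun i => pvCAf ha (pvNgeq acts (i + 1) k))

-- the common reference result
def pvRef (acts : List (List (String × String))) (ha : List Int) (n : Nat) : List (Int × Int × Int) :=
  (List.range n).map (fun i => pvTrip (pvTeam ha (pvNgeq acts (i + 1) n)) i n)

theorem pvNgeq_none_of_le (acts : List (List (String × String))) (a k : Nat) (h : k ≤ a) :
    pvNgeq acts a k = none := by
  induction k with
  | zero => rfl
  | succ k ih =>
    rw [pvNgeq, ih (by omega)]
    exact if_neg (fun hc => by omega)

theorem pvNgeq_succ_of_some (acts : List (List (String × String))) (a k j : Nat)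
    (h : pvNgeq acts a k = some j) : pvNgeq acts a (k + 1) = some j := by
  rw [pvNgeq, h]

theorem pvNgeq_succ_of_none (acts : List (List (String × String))) (a k : Nat)
    (h : pvNgeq acts a k = none) :
    pvNgeq acts a (k + 1) = if a ≤ k ∧ pvIsG acts k then some k else none := by
  rw [pvNgeq, h]

theorem pvPreIdx_le (acts : List (List (String × String))) (k : Nat) : pvPreIdx acts k ≤ k := by
  induction k with
  | zero => exact le_rfl
  | succ k ih =>
    rw [pvPreIdx]
    split <;> omega

theorem pvPreIdx_le_iff (acts : List (List (String × String))) (k i : Nat) :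
    i < k → (pvPreIdx acts k ≤ i ↔ pvNgeq acts (i + 1) k = none) := by
  induction k with
  | zero => omega
  | succ k ih =>
    intro hik1
    rw [pvPreIdx]
    by_cases hg : pvIsG acts k
    · rw [if_pos hg]
      by_cases hik : i < k
      · constructor
        · intro h'; omega
        · intro hnone
          exfalso
          rcases hsome : pvNgeq acts (i + 1) k with _ | j
          · rw [pvNgeq_succ_of_none acts (i + 1) k hsome,
              if_pos ⟨by omega, hg⟩] at hnone
            cases hnone
          · rw [pvNgeq_succ_of_some acts (i + 1) k j hsome] at hnone
            cases hnone
      · have hie : i = k := by omega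
        subst hie
        rw [pvNgeq_succ_of_none acts (i + 1) i (pvNgeq_none_of_le acts (i + 1) i (by omega)),
          if_neg (fun hc => by omega)]
        simp
    · rw [if_neg (by simpa using hg)]
      have hg' : pvIsG acts k = false := by simpa using hg
      have hR : pvNgeq acts (i + 1) (k + 1) = pvNgeq acts (i + 1) k := by
        rcases hsome : pvNgeq acts (i + 1) k with _ | j
        · rw [pvNgeq_succ_of_none acts (i + 1) k hsome, if_neg (by simp [hg'])]
        · exact pvNgeq_succ_of_some acts (i + 1) k j hsome
      rw [hR]
      by_cases hik : i < k
      · exact ih hik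
      · have hie : i = k := by omega
        subst hie
        constructor
        · intro _; exact pvNgeq_none_of_le acts (i + 1) i (by omega)
        · intro _; exact pvPreIdx_le acts i

theorem pvT_eq (acts : List (List (String × String))) (ha : List Int) (n m : Nat) (h : m ≤ n) :
    pvT acts ha n m = pvTeam ha (pvNgeq acts (n - m) n) := by
  induction m with
  | zero =>
    rw [pvT, Nat.sub_zero, pvNgeq_none_of_le acts n n le_rfl]
    rfl
  | succ m ih =>
    have hm : m ≤ n := Nat.le_of_succ_le h
    -- head characterization of pvNgeq at a = n - (m+1)
    have hhead : ∀ a, a < n → pvNgeq acts a n =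
        (if pvIsG acts a then some a else pvNgeq acts (a + 1) n) := by
      intro a
      -- prove ∀ k, a < k → pvNgeq acts a k = if … then some a else pvNgeq acts (a+1) k
      suffices hh : ∀ k, a < k → pvNgeq acts a k =
          (if pvIsG acts a then some a else pvNgeq acts (a + 1) k) from hh n
      intro k
      induction k with
      | zero => omega
      | succ k ihk =>
        intro hak1
        by_cases hak : a < k
        · by_cases hg : pvIsG acts a
          · rw [pvNgeq_succ_of_some acts a k a (by rw [ihk hak, if_pos hg]), if_pos hg]
          · have he : pvNgeq acts a k = pvNgeq acts (a + 1) k := by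
              rw [ihk hak, if_neg hg]
            rw [if_neg hg]
            rcases hs : pvNgeq acts (a + 1) k with _ | j
            · rw [pvNgeq_succ_of_none acts a k (he.trans hs),
                pvNgeq_succ_of_none acts (a + 1) k hs]
              have hiff : (a ≤ k) ↔ (a + 1 ≤ k) := by omega
              simp [hiff]
            · rw [pvNgeq_succ_of_some acts a k j (he.trans hs),
                pvNgeq_succ_of_some acts (a + 1) k j hs]
        · have hae : a = k := by omega
          subst hae
          rw [pvNgeq_succ_of_none acts a a (pvNgeq_none_of_le acts a a le_rfl)]
          by_cases hg : pvIsG acts a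
          · rw [if_pos ⟨le_rfl, hg⟩, if_pos hg]
          · rw [if_neg (fun hc => hg hc.2), if_neg hg,
              pvNgeq_none_of_le acts (a + 1) (a + 1) le_rfl]
    have ha1 : n - m - 1 = n - (m + 1) := by omega
    have hlt : n - (m + 1) < n := by omega
    have h2 : n - (m + 1) + 1 = n - m := by omega
    rw [pvT, ha1, hhead (n - (m + 1)) hlt, h2]
    by_cases hg : pvIsG acts (n - (m + 1))
    · rw [if_pos hg, if_pos hg]
      rfl
    · rw [if_neg (by simpa using hg), if_neg (by simpa using hg), ih hm]

-- how pvNgeq (i+1) (k+1) looks elementwise, split by the three relevant cases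
theorem pvCHf_step_none_lt (acts : List (List (String × String))) (ha : List Int) (i k : Nat)
    (hng : pvNgeq acts (i + 1) k = none) (hik : i < k) (hg : pvIsG acts k = true) :
    pvCHf ha (pvNgeq acts (i + 1) (k + 1)) = (if ha.getD k 0 == (1 : Int) then 1 else 0) := by
  rw [pvNgeq_succ_of_none acts (i + 1) k hng, if_pos ⟨by omega, hg⟩]
  rfl

theorem pvCAf_step_none_lt (acts : List (List (String × String))) (ha : List Int) (i k : Nat)
    (hng : pvNgeq acts (i + 1) k = none) (hik : i < k) (hg : pvIsG acts k = true) :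
    pvCAf ha (pvNgeq acts (i + 1) (k + 1)) =
      (if ha.getD k 0 == (1 : Int) then 0 else if ha.getD k 0 == (0 : Int) then 1 else 0) := by
  rw [pvNgeq_succ_of_none acts (i + 1) k hng, if_pos ⟨by omega, hg⟩]
  rfl

theorem pvNgeq_step_unchanged (acts : List (List (String × String))) (i k : Nat)
    (h : pvNgeq acts (i + 1) k = none → (¬ i < k ∨ pvIsG acts k = false)) :
    pvNgeq acts (i + 1) (k + 1) = pvNgeq acts (i + 1) k := by
  rcases hng : pvNgeq acts (i + 1) k with _ | j
  · rw [pvNgeq_succ_of_none acts (i + 1) k hng, if_neg]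
    rcases h hng with h' | h'
    · exact fun hc => h' (by omega)
    · exact fun hc => by rw [h'] at hc; exact Bool.false_ne_true hc.2
  · exact pvNgeq_succ_of_some acts (i + 1) k j hng

-- A's goal-branch step: closed forms advance from k to k+1
theorem pvStepA_goal (acts : List (List (String × String))) (ha : List Int) (n k : Nat)
    (_hk : k < n) (ce : List Int) :
    pvStepA acts ha n (pvPreIdx acts k, pvCH acts ha n k, pvCA acts ha n k, ce) k =
      (if (k == n - 1) then
        (pvPreIdx acts (k + 1), pvCH acts ha n (k + 1), pvCA acts ha n (k + 1),
          pvSliceFill ce (pvPreIdx acts (k + 1)) k)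
      else (pvPreIdx acts (k + 1), pvCH acts ha n (k + 1), pvCA acts ha n (k + 1), ce)) := by
  have hCHfill : pvIsG acts k = true → (ha.getD k 0 == (1 : Int)) = true →
      pvSliceFill (pvCH acts ha n k) (pvPreIdx acts k) k = pvCH acts ha n (k + 1) := by
    intro hg h1
    apply List.ext_getElem
    · simp [pvSliceFill, pvCH]
    · intro i hi1 hi2
      simp only [pvSliceFill, List.getElem_mapIdx, pvCH, List.getElem_map, List.getElem_range]
      rcases hng : pvNgeq acts (i + 1) k with _ | j
      · by_cases hik : i < k
        · rw [if_pos ⟨((pvPreIdx_le_iff acts k i) hik).mpr hng, hik⟩,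
            pvCHf_step_none_lt acts ha i k hng hik hg, if_pos h1]
        · rw [if_neg (fun hc => hik hc.2),
            pvNgeq_step_unchanged acts i k (fun _ => Or.inl hik), hng]
      · rw [if_neg (fun hc => by
            rw [(pvPreIdx_le_iff acts k i) hc.2] at hc
            rw [hc.1] at hng
            cases hng),
          pvNgeq_succ_of_some acts (i + 1) k j hng]
  have hCAfill : pvIsG acts k = true → (ha.getD k 0 == (1 : Int)) = false →
      (ha.getD k 0 == (0 : Int)) = true →
      pvSliceFill (pvCA acts ha n k) (pvPreIdx acts k) k = pvCA acts ha n (k + 1) := by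
    intro hg h1 h0
    apply List.ext_getElem
    · simp [pvSliceFill, pvCA]
    · intro i hi1 hi2
      simp only [pvSliceFill, List.getElem_mapIdx, pvCA, List.getElem_map, List.getElem_range]
      rcases hng : pvNgeq acts (i + 1) k with _ | j
      · by_cases hik : i < k
        · rw [if_pos ⟨((pvPreIdx_le_iff acts k i) hik).mpr hng, hik⟩,
            pvCAf_step_none_lt acts ha i k hng hik hg, if_neg (by simpa using h1), if_pos h0]
        · rw [if_neg (fun hc => hik hc.2),
            pvNgeq_step_unchanged acts i k (fun _ => Or.inl hik), hng]
      · rw [if_neg (fun hc => by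
            rw [(pvPreIdx_le_iff acts k i) hc.2] at hc
            rw [hc.1] at hng
            cases hng),
          pvNgeq_succ_of_some acts (i + 1) k j hng]
  have hCHsame : pvIsG acts k = true → (ha.getD k 0 == (1 : Int)) = false →
      pvCH acts ha n k = pvCH acts ha n (k + 1) := by
    intro hg h1
    apply List.ext_getElem
    · simp [pvCH]
    · intro i hi1 hi2
      simp only [pvCH, List.getElem_map, List.getElem_range]
      rcases hng : pvNgeq acts (i + 1) k with _ | j
      · by_cases hik : i < k
        · rw [pvCHf_step_none_lt acts ha i k hng hik hg, if_neg (by simpa using h1)]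
          rfl
        · rw [pvNgeq_step_unchanged acts i k (fun _ => Or.inl hik), hng]
      · rw [pvNgeq_succ_of_some acts (i + 1) k j hng]
  have hCAsame1 : pvIsG acts k = true → (ha.getD k 0 == (1 : Int)) = true →
      pvCA acts ha n k = pvCA acts ha n (k + 1) := by
    intro hg h1
    apply List.ext_getElem
    · simp [pvCA]
    · intro i hi1 hi2
      simp only [pvCA, List.getElem_map, List.getElem_range]
      rcases hng : pvNgeq acts (i + 1) k with _ | j
      · by_cases hik : i < k
        · rw [pvCAf_step_none_lt acts ha i k hng hik hg, if_pos h1]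
          rfl
        · rw [pvNgeq_step_unchanged acts i k (fun _ => Or.inl hik), hng]
      · rw [pvNgeq_succ_of_some acts (i + 1) k j hng]
  have hCAsame2 : pvIsG acts k = true → (ha.getD k 0 == (1 : Int)) = false →
      (ha.getD k 0 == (0 : Int)) = false →
      pvCA acts ha n k = pvCA acts ha n (k + 1) := by
    intro hg h1 h0
    apply List.ext_getElem
    · simp [pvCA]
    · intro i hi1 hi2
      simp only [pvCA, List.getElem_map, List.getElem_range]
      rcases hng : pvNgeq acts (i + 1) k with _ | j
      · by_cases hik : i < k
        · rw [pvCAf_step_none_lt acts ha i k hng hik hg, if_neg (by simpa using h1),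
            if_neg (by simpa using h0)]
          rfl
        · rw [pvNgeq_step_unchanged acts i k (fun _ => Or.inl hik), hng]
      · rw [pvNgeq_succ_of_some acts (i + 1) k j hng]
  have hCHnog : pvIsG acts k = false → pvCH acts ha n k = pvCH acts ha n (k + 1) := by
    intro hg
    apply List.ext_getElem
    · simp [pvCH]
    · intro i hi1 hi2
      simp only [pvCH, List.getElem_map, List.getElem_range]
      rw [pvNgeq_step_unchanged acts i k (fun _ => Or.inr hg)]
  have hCAnog : pvIsG acts k = false → pvCA acts ha n k = pvCA acts ha n (k + 1) := by
    intro hg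
    apply List.ext_getElem
    · simp [pvCA]
    · intro i hi1 hi2
      simp only [pvCA, List.getElem_map, List.getElem_range]
      rw [pvNgeq_step_unchanged acts i k (fun _ => Or.inr hg)]
  unfold pvStepA
  by_cases hg : pvIsG acts k
  · have hg' : (pvNameOf (acts.getD k []) == some "goal") = true := hg
    rw [pvPreIdx, if_pos hg]
    by_cases h1 : (ha.getD k 0 == (1 : Int)) = true
    · simp only [hg', h1, if_true]
      rw [hCHfill hg h1, hCAsame1 hg h1]
    · have h1' : (ha.getD k 0 == (1 : Int)) = false := by simpa using h1
      by_cases h0 : (ha.getD k 0 == (0 : Int)) = true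
      · simp only [hg', h1', h0, Bool.false_eq_true, if_false, if_true]
        rw [hCAfill hg h1' h0, hCHsame hg h1']
      · have h0' : (ha.getD k 0 == (0 : Int)) = false := by simpa using h0
        simp only [hg', h1', h0', Bool.false_eq_true, if_false, if_true]
        rw [hCHsame hg h1', hCAsame2 hg h1' h0']
  · have hgf : pvIsG acts k = false := by simpa using hg
    have hg' : (pvNameOf (acts.getD k []) == some "goal") = false := hgf
    have hp : pvPreIdx acts (k + 1) = pvPreIdx acts k := by
      rw [pvPreIdx, hgf]
      simp
    simp only [hg', Bool.false_eq_true, if_false, hp, ← hCHnog hgf, ← hCAnog hgf]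

-- A's fold invariant over the first k iterations (k below the last index: the end-branch is idle)
theorem pvFoldA_inv (acts : List (List (String × String))) (ha : List Int) (n : Nat) (k : Nat)
    (_hk : k ≤ n - 1) :
    (List.range k).foldl (pvStepA acts ha n)
      (0, List.replicate n (0 : Int), List.replicate n (0 : Int), List.replicate n (0 : Int)) =
    (pvPreIdx acts k, pvCH acts ha n k, pvCA acts ha n k, List.replicate n (0 : Int)) := by
  induction k with
  | zero =>
    simp only [List.range_zero, List.foldl_nil]
    have hch : List.replicate n (0 : Int) = pvCH acts ha n 0 := by
      apply List.ext_getElem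
      · simp [pvCH]
      · intro i hi1 hi2
        simp [pvCH, pvNgeq, pvCHf]
    have hca : List.replicate n (0 : Int) = pvCA acts ha n 0 := by
      apply List.ext_getElem
      · simp [pvCA]
      · intro i hi1 hi2
        simp [pvCA, pvNgeq, pvCAf]
    rw [pvPreIdx, ← hch, ← hca]
  | succ k ih =>
    have hk' : k ≤ n - 1 := by omega
    have hkn : k < n := by omega
    rw [List.range_succ, List.foldl_append, List.foldl_cons, List.foldl_nil, ih hk',
      pvStepA_goal acts ha n k hkn, if_neg (by simp; omega)]

-- A's full result is pvRef
theorem pvA_eq_ref (acts : List (List (String × String))) (ha : List Int) :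
    compute_next_goal_calibration_values acts ha = pvRef acts ha acts.length := by
  unfold compute_next_goal_calibration_values
  dsimp only
  set n := acts.length with hn
  rcases Nat.eq_zero_or_pos n with h0 | hpos
  · simp [h0, pvRef]
  · have hsub : n - 1 + 1 = n := by omega
    have hrange : List.range n = List.range (n - 1) ++ [n - 1] := by
      have h := List.range_succ (n := n - 1)
      simp only [Nat.succ_eq_add_one] at h
      rwa [hsub] at h
    have hfold :
        (List.range n).foldl (pvStepA acts ha n)
          (0, List.replicate n (0 : Int), List.replicate n (0 : Int), List.replicate n (0 : Int)) =
        (pvPreIdx acts n, pvCH acts ha n n, pvCA acts ha n n,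
          pvSliceFill (List.replicate n (0 : Int)) (pvPreIdx acts n) (n - 1)) := by
      rw [hrange, List.foldl_append, List.foldl_cons, List.foldl_nil,
        pvFoldA_inv acts ha n (n - 1) le_rfl,
        pvStepA_goal acts ha n (n - 1) (by omega), if_pos (by simp), hsub]
    rw [hfold]
    simp only
    apply List.ext_getElem
    · simp [pvCH, pvCA, pvSliceFill, pvRef]
    · intro i hi1 hi2
      have hin : i < n := by
        simp [pvRef] at hi2
        omega
      rw [List.getElem_zip, List.getElem_zip]
      simp only [pvCH, pvCA, pvSliceFill, pvRef, List.getElem_map, List.getElem_range,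
        List.getElem_mapIdx, List.getElem_replicate]
      rcases hng : pvNgeq acts (i + 1) n with _ | j
      · have hpre : pvPreIdx acts n ≤ i := ((pvPreIdx_le_iff acts n i) hin).mpr hng
        simp only [pvTeam, Option.map_none, pvTrip, pvCHf, pvCAf]
        by_cases hend : i < n - 1
        · rw [if_pos ⟨hpre, hend⟩, if_pos hend]
        · rw [if_neg (fun hc => hend hc.2), if_neg hend]
      · have hnp : ¬ (pvPreIdx acts n ≤ i ∧ i < n - 1) := by
          intro hp
          rw [(pvPreIdx_le_iff acts n i) hin] at hp
          rw [hp.1] at hng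
          cases hng
        rw [if_neg hnp]
        simp only [pvTeam, Option.map_some, pvTrip, pvCHf, pvCAf]
        by_cases hv1 : (ha[j]?).getD 0 = 1
        · simp [hv1]
        · by_cases hv0 : (ha[j]?).getD 0 = 0
          · simp [hv0]
          · simp [hv0, hv1]

-- B's backward-loop invariant
theorem pvAltGo_inv (acts : List (List (String × String))) (ha : List Int) (n : Nat) :
    ∀ (k : Nat), k ≤ n → ∀ (acc : List (Int × Int × Int)),
      pvAltGo acts ha n k (pvT acts ha n (n - k)) acc =
        ((List.range k).map (fun i => pvTrip (pvTeam ha (pvNgeq acts (i + 1) n)) i n)) ++ acc := by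
  intro k
  induction k with
  | zero => intro _ acc; simp [pvAltGo]
  | succ k ih =>
    intro hkn acc
    have hk : k ≤ n := by omega
    rw [pvAltGo]
    have hTstep : (if pvNameOf (acts.getD k []) == some "goal"
        then some (ha.getD k 0) else pvT acts ha n (n - (k + 1))) = pvT acts ha n (n - k) := by
      have hnk : n - k = (n - (k + 1)) + 1 := by omega
      rw [hnk, pvT]
      have hidx : n - (n - (k + 1)) - 1 = k := by omega
      rw [hidx]
      rfl
    have hTval : pvT acts ha n (n - (k + 1)) = pvTeam ha (pvNgeq acts (k + 1) n) := by
      rw [pvT_eq acts ha n (n - (k + 1)) (by omega)]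
      have h2 : n - (n - (k + 1)) = k + 1 := by omega
      rw [h2]
    rw [hTstep, ih hk, hTval, List.range_succ, List.map_append, List.append_assoc]
    rfl

-- B's full result is pvRef
theorem pvB_eq_ref (acts : List (List (String × String))) (ha : List Int) :
    compute_next_goal_calibration_values_alt acts ha = pvRef acts ha acts.length := by
  unfold compute_next_goal_calibration_values_alt
  have h0 : (none : Option Int) = pvT acts ha acts.length (acts.length - acts.length) := by
    rw [Nat.sub_self]
    rfl
  rw [h0, pvAltGo_inv acts ha acts.length acts.length le_rfl []]
  simp [pvRef]

-- ===== VERDICT (by name: the statement is the Claim_ definition above) =====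
theorem compute_next_goal_calibration_values_spec : Claim_equal_compute_next_goal_calibration_values := by
  intro acts ha _ _
  unfold Spec_compute_next_goal_calibration_values
  rw [pvA_eq_ref, pvB_eq_ref]
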